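-- pv_equiv track=rewrite | github.com/dirtysalt/codes | aoc2023/day9.py | solve
-- ===== SOURCE A (Python) =====
-- def solve(nums):
--     last = []
--     tmp = nums.copy()
--     while True:
--         last.append(tmp[-1])
--         tmp2 = []
--         for i in range(1, len(tmp)):
--             tmp2.append(tmp[i] - tmp[i - 1])
--         if all((x == 0 for x in tmp2)):
--             break
--         tmp = tmp2
--     return sum(last)
-- ===== SOURCE B (Python) =====
-- def solve(nums):
--     # Closed-form Newton extrapolation: next value = sum_j (-1)^j * C(n, j+1) * nums[n-1-j]
--     n = len(nums)
--     total = 0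
--     c = 1
--     sign = 1
--     j = 0
--     for x in reversed(nums):
--         c = c * (n - j) // (j + 1)
--         total += sign * c * x
--         sign = -sign
--         j += 1
--     return total
-- ===== Notes on version B (the rewrite author's own statement) =====
-- stated objective: faster
-- what changed: Replaced the quadratic difference-table loop (rebuild the diff row until all zeros, summing last elements) by a single O(n) pass over the reversed input that accumulates the closed-form Newton extrapolation sum_j (-1)^j * C(n, j+1) * nums[n-1-j] with incrementally updated binomial coefficients.
import Mathlib
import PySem

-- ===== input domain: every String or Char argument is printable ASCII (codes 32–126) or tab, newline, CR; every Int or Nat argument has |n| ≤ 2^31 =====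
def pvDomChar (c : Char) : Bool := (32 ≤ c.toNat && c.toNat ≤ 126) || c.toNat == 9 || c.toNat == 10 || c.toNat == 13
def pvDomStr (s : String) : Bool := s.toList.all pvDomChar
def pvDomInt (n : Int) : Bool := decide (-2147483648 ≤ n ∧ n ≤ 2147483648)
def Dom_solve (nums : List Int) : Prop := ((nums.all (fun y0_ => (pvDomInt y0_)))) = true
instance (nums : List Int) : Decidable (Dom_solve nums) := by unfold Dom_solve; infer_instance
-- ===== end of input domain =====

-- B replaces A's quadratic difference-table loop by a single O(n) pass computing the
-- closed-form Newton combination  sum_j (-1)^j * C(n, j+1) * nums[n-1-j].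

-- ===== PORT A =====
-- the inner "for i in range(1, len(tmp))" loop building the difference list
def diffsA : List Int → List Int
  | a :: b :: rest => (b - a) :: diffsA (b :: rest)
  | _ => []

-- used by loopA's termination proof
lemma diffsA_length (xs : List Int) : (diffsA xs).length = xs.length - 1 := by
  match xs with
  | [] => rfl
  | [_] => rfl
  | a :: b :: rest => simp [diffsA, diffsA_length (b :: rest)]

-- the "while True" loop; tmp[-1] via pyGet? (its ".getD 0" branch is unreachable
-- under Pre_solve: the loop never recurses into an empty tmp)
def loopA (tmp last : List Int) : Int :=
  if (diffsA tmp).all (fun x => x == 0) then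
    (last ++ [(PySem.List.pyGet? tmp (-1)).getD 0]).sum
  else
    loopA (diffsA tmp) (last ++ [(PySem.List.pyGet? tmp (-1)).getD 0])
termination_by tmp.length
decreasing_by
  rename_i h
  have hl := diffsA_length tmp
  have h1 : diffsA tmp ≠ [] := by
    intro he; rw [he] at h; simp at h
  have : (diffsA tmp).length ≠ 0 := by simpa using h1
  omega

def solve (nums : List Int) : Int := loopA nums []

-- ===== PORT B =====
-- the body of Source B's "for x in reversed(nums)" loop; state = (total, c, sign, j)
def stepB (n : Nat) (st : Int × Int × Int × Int) (x : Int) : Int × Int × Int × Int :=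
  let c' := PySem.Int.floordiv (st.2.1 * ((n : Int) - st.2.2.2)) (st.2.2.2 + 1)
  (st.1 + st.2.2.1 * c' * x, c', -st.2.2.1, st.2.2.2 + 1)

def solve_alt (nums : List Int) : Int :=
  (nums.reverse.foldl (stepB nums.length) (0, 1, 1, 0)).1

-- ===== PRECONDITION & SPEC =====
-- Pre_ excludes only the empty list, on which Python A raises IndexError (tmp[-1]).
def Pre_solve (nums : List Int) : Prop := nums ≠ []
instance (nums : List Int) : Decidable (Pre_solve nums) := by unfold Pre_solve; infer_instance
def pvWitness_solve : List Int := [1, 3, 6]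

def Spec_solve (nums : List Int) (out : Int) : Prop := out = solve_alt nums
instance (nums : List Int) (out : Int) : Decidable (Spec_solve nums out) := by unfold Spec_solve; infer_instance

-- ===== CLAIM (what is proved, stated in full; the proofs are below) =====
def Claim_equal_solve : Prop := ∀ (nums : List Int), Dom_solve nums → Pre_solve nums → Spec_solve nums (solve nums)

-- ===== LEMMAS AND PROOFS =====

-- the Newton binomial sum both ports are bridged to
def newtonM (xs : List Int) : Int :=
  ∑ j ∈ Finset.range xs.length,
    (-1 : Int) ^ j * (xs.length.choose (j + 1) : Int) * xs.getD (xs.length - 1 - j) 0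

lemma diffsA_getD (xs : List Int) (k : Nat) (h : k + 1 < xs.length) :
    (diffsA xs).getD k 0 = xs.getD (k + 1) 0 - xs.getD k 0 := by
  match xs, k with
  | a :: b :: rest, 0 => simp [diffsA]
  | a :: b :: rest, k + 1 =>
    simp only [diffsA, List.getD_cons_succ]
    exact diffsA_getD (b :: rest) k (by simpa using h)

lemma newtonM_zero (xs : List Int) (h : ∀ x ∈ xs, x = 0) : newtonM xs = 0 := by
  unfold newtonM
  apply Finset.sum_eq_zero
  intro j hj
  have hj' : j < xs.length := Finset.mem_range.mp hj
  have hidx : xs.length - 1 - j < xs.length := by omega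
  rw [List.getD_eq_getElem xs 0 hidx, h _ (xs.getElem_mem hidx)]
  ring

-- the Newton recurrence: value = last element + Newton sum of the difference list (Pascal)
lemma newtonM_rec (xs : List Int) (h : xs ≠ []) :
    newtonM xs = xs.getD (xs.length - 1) 0 + newtonM (diffsA xs) := by
  cases xs with
  | nil => exact absurd rfl h
  | cons y ys =>
    have hdl : (diffsA (y :: ys)).length = ys.length := by
      have := diffsA_length (y :: ys); simpa using this
    set m := ys.length with hm
    have hsub : ∀ j, j < m → (diffsA (y::ys)).getD (m-1-j) 0
        = (y::ys).getD (m-j) 0 - (y::ys).getD (m-1-j) 0 := by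
      intro j hj
      have h1 : (m-1-j) + 1 = m - j := by omega
      have h2 := diffsA_getD (y::ys) (m-1-j) (by simp [← hm]; omega)
      rw [h1] at h2; exact h2
    have hR : newtonM (diffsA (y::ys))
        = ∑ j ∈ Finset.range m, (-1:Int)^j * (m.choose (j+1) : Int) * ((y::ys).getD (m-j) 0 - (y::ys).getD (m-1-j) 0) := by
      unfold newtonM; rw [hdl]
      exact Finset.sum_congr rfl (fun j hj => by rw [hsub j (Finset.mem_range.mp hj)])
    have hL : newtonM (y::ys)
        = ∑ j ∈ Finset.range (m+1), ((-1:Int)^j * (m.choose j : Int) * (y::ys).getD (m-j) 0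
            + (-1:Int)^j * (m.choose (j+1) : Int) * (y::ys).getD (m-j) 0) := by
      unfold newtonM; simp only [List.length_cons, ← hm]
      refine Finset.sum_congr rfl (fun j hj => ?_)
      have hc : (((m+1).choose (j+1) : Nat) : Int) = (m.choose j : Int) + (m.choose (j+1) : Int) := by
        rw [Nat.choose_succ_succ]; push_cast; ring
      have hix : m + 1 - 1 - j = m - j := by omega
      rw [hix, hc]; ring
    rw [hL, hR, Finset.sum_add_distrib, Finset.sum_range_succ', Finset.sum_range_succ]
    simp only [Nat.choose_succ_self, Nat.cast_zero, mul_zero, zero_mul, add_zero, pow_zero,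
      Nat.choose_zero_right, Nat.cast_one, one_mul, Nat.sub_zero]
    have hcomb : ∑ j ∈ Finset.range m, (-1:Int)^(j+1) * (m.choose (j+1) : Int) * (y::ys).getD (m-(j+1)) 0
        + ∑ j ∈ Finset.range m, (-1:Int)^j * (m.choose (j+1) : Int) * (y::ys).getD (m-j) 0
        = ∑ j ∈ Finset.range m, (-1:Int)^j * (m.choose (j+1) : Int) * ((y::ys).getD (m-j) 0 - (y::ys).getD (m-1-j) 0) := by
      rw [← Finset.sum_add_distrib]
      refine Finset.sum_congr rfl (fun j hj => ?_)
      have : m - (j+1) = m - 1 - j := by omega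
      rw [this]; ring
    have hix2 : (y :: ys).length - 1 = m := by simp [← hm]
    rw [hix2]
    linarith [hcomb]

lemma pyLast_eq (tmp : List Int) :
    (PySem.List.pyGet? tmp (-1)).getD 0 = tmp.getD (tmp.length - 1) 0 := by
  rw [PySem.List.pyGet?_neg_one, List.getLast?_eq_getElem?, List.getD_eq_getElem?_getD]

-- A's loop computes the accumulated sum plus the Newton sum of the current row
lemma loopA_eq (tmp last : List Int) (h : tmp ≠ []) :
    loopA tmp last = last.sum + newtonM tmp := by
  induction tmp, last using loopA.induct with
  | case1 tmp last hc =>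
    rw [loopA, if_pos hc, pyLast_eq tmp, newtonM_rec tmp h,
      newtonM_zero (diffsA tmp) (by simpa [List.all_eq_true] using hc)]
    simp
  | case2 tmp last hc ih =>
    have hd : diffsA tmp ≠ [] := by intro he; rw [he] at hc; simp at hc
    rw [loopA, if_neg hc, ih hd, pyLast_eq tmp, newtonM_rec tmp h]
    simp; ring

-- Source B's exact binomial update: C(n,j) * (n-j) // (j+1) = C(n,j+1)
lemma choose_step (n j : Nat) (hj : j < n) :
    PySem.Int.floordiv ((n.choose j : Int) * ((n : Int) - (j : Int))) ((j : Int) + 1)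
      = (n.choose (j + 1) : Int) := by
  have h1 : (n.choose j : Int) * ((n : Int) - (j : Int)) = ((n.choose j * (n - j) : Nat) : Int) := by
    push_cast [Nat.cast_sub hj.le]; ring
  have h2 : ((j : Int) + 1) = ((j + 1 : Nat) : Int) := by push_cast; ring
  rw [h1, h2, PySem.Int.floordiv_natCast]
  have h3 : n.choose j * (n - j) = n.choose (j + 1) * (j + 1) := (Nat.choose_succ_right_eq n j).symm
  rw [h3, Nat.mul_div_cancel _ (Nat.succ_pos j)]

-- invariant of B's fold: state = (partial sum, C(n,j), (-1)^j, j)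
lemma fold_inv (n : Nat) (ys : List Int) : ∀ (j : Nat) (t : Int), j + ys.length ≤ n →
    ((ys.foldl (stepB n)
      (t, (n.choose j : Int), (-1 : Int)^j, (j : Int))).1
      = t + ∑ i ∈ Finset.range ys.length, (-1 : Int)^(j+i) * (n.choose (j+i+1) : Int) * ys.getD i 0) := by
  induction ys with
  | nil => intro j t _; simp
  | cons x ys ih =>
    intro j t hle
    have hj : j < n := by simp at hle; omega
    simp only [List.foldl_cons]
    have hstep : stepB n (t, (n.choose j : Int), (-1 : Int)^j, (j : Int)) x
        = (t + (-1:Int)^j * (n.choose (j+1) : Int) * x, (n.choose (j+1) : Int), (-1:Int)^(j+1), ((j+1 : Nat) : Int)) := by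
      simp only [stepB, choose_step n j hj, Prod.mk.injEq]
      exact ⟨trivial, trivial, by ring, by push_cast; ring⟩
    rw [hstep]
    rw [ih (j+1) _ (by simp at hle ⊢; omega)]
    simp only [List.length_cons]
    rw [Finset.sum_range_succ']
    simp only [List.getD_cons_succ, List.getD_cons_zero]
    have : ∀ i, j + 1 + i = j + (i + 1) := by omega
    rw [Finset.sum_congr rfl (fun i _ => by rw [this i])]
    ring

lemma solve_alt_eq (xs : List Int) : solve_alt xs = newtonM xs := by
  unfold solve_alt
  have h0 : ((0 : Int), (1 : Int), (1 : Int), (0 : Int))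
      = ((0 : Int), ((xs.length.choose 0 : Nat) : Int), (-1 : Int)^0, ((0 : Nat) : Int)) := by
    simp
  rw [h0, fold_inv xs.length xs.reverse 0 0 (by simp)]
  unfold newtonM
  simp only [List.length_reverse, zero_add]
  refine Finset.sum_congr rfl (fun i hi => ?_)
  have hi' : i < xs.length := Finset.mem_range.mp hi
  rw [List.getD_eq_getElem _ _ (by simpa using hi'),
      List.getD_eq_getElem _ _ (by omega)]
  congr 1
  rw [List.getElem_reverse]

-- ===== VERDICT (by name: the statement is the Claim_ definition above) =====
theorem solve_spec : Claim_equal_solve := by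
  intro nums _ hpre
  unfold Spec_solve solve
  rw [loopA_eq nums [] hpre, solve_alt_eq]
  simp
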